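-- pv_equiv track=rewrite | github.com/rohith203/Clustering-Algorithms | dissimilarity.py | get_dissimilarity
-- ===== SOURCE A (Python) =====
-- gap = 2
--
-- substitution = 1
--
-- match = 0
--
-- def get_dissimilarity(sequenceA, sequenceB):
--     opt = [[0 for i in range(len(sequenceB) + 1)] for j in range(len(sequenceA)+1)]
--     for i in range(1,len(sequenceA) + 1):
--         opt[i][0] = opt[i - 1][0] + gap
--     for j in range(1,len(sequenceB) + 1):
--         opt[0][j] = opt[0][j - 1] + gap
--
--     for i in range(1,len(sequenceA) + 1):
--         for j in range(1,len(sequenceB) + 1):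
--             scoreDiag = opt[i - 1][j - 1]
--             if sequenceA[i-1] == sequenceB[j-1]: scoreDiag+=match
--             else: scoreDiag+=substitution
--             scoreLeft = opt[i][j - 1] + gap
--             scoreUp = opt[i - 1][j] + gap
--
--             opt[i][j] = min(min(scoreDiag, scoreLeft), scoreUp)
--
--     return opt[len(sequenceA)][len(sequenceB)]
-- ===== SOURCE B (Python) =====
-- gap = 2
--
-- substitution = 1
--
-- match = 0
--
-- def get_dissimilarity(sequenceA, sequenceB):
--     # Top-down memoized recursion on prefix lengths instead of a bottom-up table.
--     memo = {}
--     def solve(i, j):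
--         if (i, j) in memo:
--             return memo[(i, j)]
--         if i == 0:
--             v = j * gap
--         elif j == 0:
--             v = i * gap
--         else:
--             d = solve(i - 1, j - 1) + (match if sequenceA[i - 1] == sequenceB[j - 1] else substitution)
--             v = min(d, solve(i, j - 1) + gap, solve(i - 1, j) + gap)
--         memo[(i, j)] = v
--         return v
--     return solve(len(sequenceA), len(sequenceB))
-- ===== Notes on version B (the rewrite author's own statement) =====
-- stated objective: alternative
-- what changed: Replaces A's bottom-up table fill (three explicit index loops over an (n+1)x(m+1) matrix) by a top-down memoized recursion solve(i,j) on prefix lengths with a dict cache, returning solve(n,m); only reachable subproblems are evaluated, driven by demand rather than by loop order.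
import Mathlib
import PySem

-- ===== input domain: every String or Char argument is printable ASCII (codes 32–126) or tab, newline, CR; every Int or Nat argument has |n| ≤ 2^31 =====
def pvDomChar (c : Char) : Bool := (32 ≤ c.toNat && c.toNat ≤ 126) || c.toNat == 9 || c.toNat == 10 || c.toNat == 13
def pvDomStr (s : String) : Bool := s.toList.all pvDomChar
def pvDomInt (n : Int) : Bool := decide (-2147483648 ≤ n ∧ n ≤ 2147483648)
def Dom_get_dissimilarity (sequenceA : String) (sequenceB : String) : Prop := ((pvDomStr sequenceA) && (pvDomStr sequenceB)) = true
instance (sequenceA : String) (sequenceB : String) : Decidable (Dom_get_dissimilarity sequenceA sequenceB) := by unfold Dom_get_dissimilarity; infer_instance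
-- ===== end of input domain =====

-- B replaces A's bottom-up table fill by a top-down memoized recursion on prefix
-- lengths (dict cache keyed by (i, j)); objective: alternative decomposition.

-- ===== PORT A =====
-- opt[i][j] read/write on the list-of-lists matrix (in-range on every use below)
def pvMget (o : List (List Int)) (i j : Nat) : Int := (o.getD i []).getD j 0
def pvMset (o : List (List Int)) (i j : Nat) (v : Int) : List (List Int) :=
  o.set i ((o.getD i []).set j v)

-- body of A's inner loop (index shifted: i, j here are Python's i-1, j-1)
def pvStepCell (a b : List Char) (i : Nat) (o : List (List Int)) (j : Nat) : List (List Int) :=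
  let scoreDiag := pvMget o i j + (if a.getD i ' ' = b.getD j ' ' then (0 : Int) else 1)
  let scoreLeft := pvMget o (i + 1) j + 2
  let scoreUp := pvMget o i (j + 1) + 2
  pvMset o (i + 1) (j + 1) (min (min scoreDiag scoreLeft) scoreUp)

-- inner 'for j in range(1, len(sequenceB)+1)' loop of A
def pvStepRow (a b : List Char) (o : List (List Int)) (i : Nat) : List (List Int) :=
  (List.range b.length).foldl (pvStepCell a b i) o

def get_dissimilarity (sequenceA : String) (sequenceB : String) : Int :=
  let a := sequenceA.toList
  let b := sequenceB.toList
  let opt := List.replicate (a.length + 1) (List.replicate (b.length + 1) (0 : Int))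
  let opt := (List.range a.length).foldl (fun o i => pvMset o (i + 1) 0 (pvMget o i 0 + 2)) opt
  let opt := (List.range b.length).foldl (fun o j => pvMset o 0 (j + 1) (pvMget o 0 j + 2)) opt
  let opt := (List.range a.length).foldl (fun o i => pvStepRow a b o i) opt
  pvMget opt a.length b.length

-- ===== PORT B =====
-- B's inner 'solve(i, j)': memoized recursion, the memo dict threaded through;
-- the extra fuel argument only makes the same recursion structural (fuel > i + j always holds)
def pvSolve (a b : List Char) : Nat → Nat → Nat → PySem.Dict (Nat × Nat) Int → Int × PySem.Dict (Nat × Nat) Int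
  | 0, _, _, memo => (0, memo)
  | fuel + 1, i, j, memo =>
    match memo.get? (i, j) with
    | some v => (v, memo)
    | none =>
      if i = 0 then
        let v : Int := (j : Int) * 2
        (v, memo.insert (i, j) v)
      else if j = 0 then
        let v : Int := (i : Int) * 2
        (v, memo.insert (i, j) v)
      else
        let r1 := pvSolve a b fuel (i - 1) (j - 1) memo
        let d := r1.1 + (if a.getD (i - 1) ' ' = b.getD (j - 1) ' ' then (0 : Int) else 1)
        let r2 := pvSolve a b fuel i (j - 1) r1.2
        let r3 := pvSolve a b fuel (i - 1) j r2.2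
        let v := min d (min (r2.1 + 2) (r3.1 + 2))
        (v, r3.2.insert (i, j) v)

def get_dissimilarity_alt (sequenceA : String) (sequenceB : String) : Int :=
  let a := sequenceA.toList
  let b := sequenceB.toList
  (pvSolve a b (a.length + b.length + 1) a.length b.length PySem.Dict.empty).1

-- ===== PRECONDITION & SPEC =====
def Spec_get_dissimilarity (sequenceA : String) (sequenceB : String) (out : Int) : Prop := out = get_dissimilarity_alt sequenceA sequenceB
instance (sequenceA : String) (sequenceB : String) (out : Int) : Decidable (Spec_get_dissimilarity sequenceA sequenceB out) := by unfold Spec_get_dissimilarity; infer_instance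

-- ===== CLAIM (what is proved, stated in full; the proofs are below) =====
def Claim_equal_get_dissimilarity : Prop := ∀ (sequenceA : String) (sequenceB : String), Dom_get_dissimilarity sequenceA sequenceB → Spec_get_dissimilarity sequenceA sequenceB (get_dissimilarity sequenceA sequenceB)

-- ===== LEMMAS AND PROOFS =====

-- the Needleman-Wunsch value: minimal cost aligning a[:i] with b[:j] (gap 2, substitution 1)
def pvN (a b : List Char) : Nat → Nat → Int
  | 0, j => 2 * (j : Int)
  | (i + 1), 0 => 2 * ((i : Int) + 1)
  | (i + 1), (j + 1) =>
      min (min (pvN a b i j + (if a.getD i ' ' = b.getD j ' ' then (0 : Int) else 1))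
               (pvN a b (i + 1) j + 2))
          (pvN a b i (j + 1) + 2)

theorem pvN_zero_right (a b : List Char) (i : Nat) : pvN a b i 0 = 2 * (i : Int) := by
  cases i <;> simp [pvN]

theorem pvMget_mset_same (o : List (List Int)) (i j : Nat) (v : Int)
    (hi : i < o.length) (hj : j < (o.getD i []).length) :
    pvMget (pvMset o i j v) i j = v := by
  have hj2 : j < o[i].length := by
    rwa [List.getD_eq_getElem?_getD, List.getElem?_eq_getElem hi] at hj
  unfold pvMget pvMset
  simp [List.getD_eq_getElem?_getD, hi, hj2]

theorem pvMget_mset_ne (o : List (List Int)) (i j i' j' : Nat) (v : Int)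
    (h : i ≠ i' ∨ j ≠ j') :
    pvMget (pvMset o i j v) i' j' = pvMget o i' j' := by
  unfold pvMget pvMset
  rcases eq_or_ne i i' with rfl | hii
  · have hj : j ≠ j' := h.resolve_left (fun hc => hc rfl)
    by_cases hi : i < o.length
    · simp [List.getD_eq_getElem?_getD, hi, hj]
    · rw [List.set_eq_of_length_le (Nat.le_of_not_lt hi)]
  · simp [List.getD_eq_getElem?_getD, hii]

-- invariant: matrix has the right shape and agrees with value function V on the box
def pvInv (a b : List Char) (V : Nat → Nat → Int) (o : List (List Int)) : Prop :=
  o.length = a.length + 1 ∧ (∀ r ∈ o, r.length = b.length + 1) ∧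
  ∀ i j, i ≤ a.length → j ≤ b.length → pvMget o i j = V i j

theorem pvInv_congr {a b : List Char} {V V' : Nat → Nat → Int} {o : List (List Int)}
    (h : pvInv a b V o)
    (he : ∀ i j, i ≤ a.length → j ≤ b.length → V i j = V' i j) : pvInv a b V' o := by
  obtain ⟨h1, h2, h3⟩ := h
  exact ⟨h1, h2, fun i j hi hj => (h3 i j hi hj).trans (he i j hi hj)⟩

theorem pvInv_set {a b : List Char} {V : Nat → Nat → Int} {o : List (List Int)}
    (h : pvInv a b V o) {i j : Nat} (hi : i ≤ a.length) (hj : j ≤ b.length) (v : Int) :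
    pvInv a b (fun i' j' => if i' = i ∧ j' = j then v else V i' j') (pvMset o i j v) := by
  obtain ⟨h1, h2, h3⟩ := h
  have hio : i < o.length := by omega
  have hrow : (o.getD i []).length = b.length + 1 := by
    apply h2
    rw [List.getD_eq_getElem?_getD, List.getElem?_eq_getElem hio]
    exact List.getElem_mem hio
  refine ⟨?_, ?_, ?_⟩
  · simpa [pvMset] using h1
  · intro r hr
    rcases List.mem_or_eq_of_mem_set hr with hr | rfl
    · exact h2 r hr
    · simpa using hrow
  · intro i' j' hi' hj'
    by_cases hc : i' = i ∧ j' = j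
    · obtain ⟨rfl, rfl⟩ := hc
      rw [pvMget_mset_same _ _ _ v hio (by omega)]
      simp
    · have : i ≠ i' ∨ j ≠ j' := by tauto
      rw [pvMget_mset_ne o i j i' j' v this, h3 i' j' hi' hj']
      simp [hc]

theorem pvLoop1 (a b : List Char) : ∀ t, t ≤ a.length →
    pvInv a b (fun i j => if j = 0 ∧ i ≤ t then 2 * (i : Int) else 0)
      ((List.range t).foldl (fun o i => pvMset o (i + 1) 0 (pvMget o i 0 + 2))
        (List.replicate (a.length + 1) (List.replicate (b.length + 1) (0 : Int)))) := by
  intro t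
  induction t with
  | zero =>
    intro _
    simp only [List.range_zero, List.foldl_nil]
    refine ⟨by simp, by intro r hr; simp [List.eq_of_mem_replicate hr], ?_⟩
    intro i j hi hj
    have hm : pvMget (List.replicate (a.length + 1) (List.replicate (b.length + 1) (0 : Int))) i j = 0 := by
      simp [pvMget, List.getD_eq_getElem?_getD, List.getElem?_replicate, hi]
      split_ifs <;> rfl
    rw [hm]
    beta_reduce
    split_ifs with hc
    · have h0 : i = 0 := by omega
      subst h0; simp
    · rfl
  | succ t ih =>
    intro ht
    have ht' : t ≤ a.length := Nat.le_of_succ_le ht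
    rw [List.range_succ, List.foldl_append, List.foldl_cons, List.foldl_nil]
    have hprev := ih ht'
    have hg : pvMget ((List.range t).foldl (fun o i => pvMset o (i + 1) 0 (pvMget o i 0 + 2))
        (List.replicate (a.length + 1) (List.replicate (b.length + 1) (0 : Int)))) t 0
        = 2 * (t : Int) := by
      rw [hprev.2.2 t 0 ht' (Nat.zero_le _)]
      beta_reduce
      simp
    rw [hg]
    refine pvInv_congr (pvInv_set hprev (by omega) (Nat.zero_le _) _) ?_
    intro i j hi hj
    beta_reduce
    split_ifs <;> omega

theorem pvLoop2 (a b : List Char) (o : List (List Int))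
    (h : pvInv a b (fun i j => if j = 0 ∧ i ≤ a.length then 2 * (i : Int) else 0) o) :
    ∀ s, s ≤ b.length →
    pvInv a b (fun i j => if j = 0 then 2 * (i : Int) else if i = 0 ∧ j ≤ s then 2 * (j : Int) else 0)
      ((List.range s).foldl (fun o j => pvMset o 0 (j + 1) (pvMget o 0 j + 2)) o) := by
  intro s
  induction s with
  | zero =>
    intro _
    simp only [List.range_zero, List.foldl_nil]
    refine pvInv_congr h ?_
    intro i j hi hj
    beta_reduce
    split_ifs <;> omega
  | succ s ih =>
    intro hs
    have hs' : s ≤ b.length := Nat.le_of_succ_le hs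
    rw [List.range_succ, List.foldl_append, List.foldl_cons, List.foldl_nil]
    have hprev := ih hs'
    have hg : pvMget ((List.range s).foldl (fun o j => pvMset o 0 (j + 1) (pvMget o 0 j + 2)) o) 0 s
        = 2 * (s : Int) := by
      rw [hprev.2.2 0 s (Nat.zero_le _) hs']
      beta_reduce
      split_ifs <;> omega
    rw [hg]
    refine pvInv_congr (pvInv_set hprev (Nat.zero_le _) (by omega) _) ?_
    intro i j hi hj
    beta_reduce
    split_ifs <;> omega

-- value function after t full outer iterations of A's main loop
def pvG (a b : List Char) (t i j : Nat) : Int :=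
  if i ≤ t then pvN a b i j else if j = 0 then 2 * (i : Int) else 0

-- value function inside outer iteration t, after s inner iterations
def pvF (a b : List Char) (t s i j : Nat) : Int :=
  if i ≤ t then pvN a b i j
  else if i = t + 1 then (if j = 0 then 2 * ((t : Int) + 1) else if j ≤ s then pvN a b (t + 1) j else 0)
  else if j = 0 then 2 * (i : Int) else 0

theorem pvCellF (a b : List Char) (t s : Nat) (ht : t < a.length) (hs : s < b.length)
    (o : List (List Int)) (h : pvInv a b (pvF a b t s) o) :
    pvInv a b (pvF a b t (s + 1)) (pvStepCell a b t o s) := by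
  have h1 := h.2.2 t s (le_of_lt ht) (le_of_lt hs)
  have h2 := h.2.2 (t + 1) s (by omega) (le_of_lt hs)
  have h3 := h.2.2 t (s + 1) (le_of_lt ht) (by omega)
  have e1 : pvF a b t s t s = pvN a b t s := by
    simp only [pvF, if_pos (le_refl t)]
  have e2 : pvF a b t s (t + 1) s = pvN a b (t + 1) s := by
    unfold pvF
    rcases Nat.eq_zero_or_pos s with rfl | hsp
    · rw [if_neg (by omega : ¬ t + 1 ≤ t), if_pos rfl, if_pos rfl, pvN_zero_right]
      push_cast; ring
    · rw [if_neg (by omega : ¬ t + 1 ≤ t), if_pos rfl, if_neg (by omega : ¬ s = 0),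
        if_pos (le_refl s)]
  have e3 : pvF a b t s t (s + 1) = pvN a b t (s + 1) := by
    simp only [pvF, if_pos (le_refl t)]
  unfold pvStepCell
  simp only []
  rw [h1, e1, h2, e2, h3, e3]
  have hv : min (min (pvN a b t s + (if a.getD t ' ' = b.getD s ' ' then (0 : Int) else 1))
      (pvN a b (t + 1) s + 2)) (pvN a b t (s + 1) + 2) = pvN a b (t + 1) (s + 1) := by
    rw [pvN]
  rw [hv]
  refine pvInv_congr (pvInv_set h (by omega) (by omega) _) ?_
  intro i j hi hj
  beta_reduce
  by_cases hc : i = t + 1 ∧ j = s + 1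
  · obtain ⟨rfl, rfl⟩ := hc
    have hfn : pvF a b t (s + 1) (t + 1) (s + 1) = pvN a b (t + 1) (s + 1) := by
      unfold pvF
      rw [if_neg (by omega : ¬ t + 1 ≤ t), if_pos rfl, if_neg (by omega : ¬ s + 1 = 0),
        if_pos (le_refl (s + 1))]
    rw [if_pos ⟨rfl, rfl⟩, hfn]
  · rw [if_neg hc]
    unfold pvF
    split_ifs <;> first | rfl | omega

theorem pvInner (a b : List Char) (t : Nat) (ht : t < a.length) (o : List (List Int))
    (h : pvInv a b (pvG a b t) o) :
    pvInv a b (pvG a b (t + 1)) (pvStepRow a b o t) := by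
  have key : ∀ s, s ≤ b.length →
      pvInv a b (pvF a b t s) ((List.range s).foldl (pvStepCell a b t) o) := by
    intro s
    induction s with
    | zero =>
      intro _
      simp only [List.range_zero, List.foldl_nil]
      refine pvInv_congr h ?_
      intro i j hi hj
      unfold pvG pvF
      split_ifs <;> (try subst_vars) <;> first | rfl | omega
    | succ s ihs =>
      intro hs
      rw [List.range_succ, List.foldl_append, List.foldl_cons, List.foldl_nil]
      exact pvCellF a b t s ht (by omega) _ (ihs (by omega))
  refine pvInv_congr (key b.length le_rfl) ?_
  intro i j hi hj
  unfold pvF pvG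
  split_ifs <;> (try subst_vars) <;>
    first | rfl | omega | (rw [pvN_zero_right]; push_cast; try ring)

theorem pvOuter (a b : List Char) (o : List (List Int))
    (h : pvInv a b (pvG a b 0) o) : ∀ t, t ≤ a.length →
    pvInv a b (pvG a b t) ((List.range t).foldl (fun o i => pvStepRow a b o i) o) := by
  intro t
  induction t with
  | zero => intro _; simpa using h
  | succ t ih =>
    intro ht
    rw [List.range_succ, List.foldl_append, List.foldl_cons, List.foldl_nil]
    exact pvInner a b t (by omega) _ (ih (by omega))

theorem pvA_eq (sequenceA sequenceB : String) :
    get_dissimilarity sequenceA sequenceB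
      = pvN sequenceA.toList sequenceB.toList sequenceA.toList.length sequenceB.toList.length := by
  set a := sequenceA.toList with ha
  set b := sequenceB.toList with hb
  simp only [get_dissimilarity]
  have h1 := pvLoop1 a b a.length le_rfl
  have h2 := pvLoop2 a b _ h1 b.length le_rfl
  have hbase : pvInv a b (pvG a b 0)
      ((List.range b.length).foldl (fun o j => pvMset o 0 (j + 1) (pvMget o 0 j + 2))
        ((List.range a.length).foldl (fun o i => pvMset o (i + 1) 0 (pvMget o i 0 + 2))
          (List.replicate (a.length + 1) (List.replicate (b.length + 1) (0 : Int))))) := by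
    refine pvInv_congr h2 ?_
    intro i j hi hj
    beta_reduce
    unfold pvG
    by_cases hj0 : j = 0
    · subst hj0
      by_cases hi0 : i ≤ 0
      · have h0 : i = 0 := by omega
        subst h0
        simp [pvN]
      · rw [if_pos rfl, if_neg hi0, if_pos rfl]
    · by_cases hi0 : i ≤ 0
      · have h0 : i = 0 := by omega
        subst h0
        rw [if_neg hj0, if_pos ⟨rfl, hj⟩, if_pos (le_refl 0)]
        simp [pvN]
      · rw [if_neg hj0, if_neg (by omega : ¬ (i = 0 ∧ j ≤ b.length)), if_neg hi0, if_neg hj0]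
  have houter := pvOuter a b _ hbase a.length le_rfl
  rw [houter.2.2 a.length b.length le_rfl le_rfl]
  unfold pvG
  rw [if_pos le_rfl]

-- ===== B side =====
-- memo invariant: every cached entry is the true alignment value
def pvGood (a b : List Char) (m : PySem.Dict (Nat × Nat) Int) : Prop :=
  ∀ i j v, m.get? (i, j) = some v → v = pvN a b i j

theorem pvGood_empty (a b : List Char) : pvGood a b PySem.Dict.empty := by
  intro i j v h
  simp [PySem.Dict.get?_empty] at h

theorem pvGood_insert {a b : List Char} {m : PySem.Dict (Nat × Nat) Int}
    (h : pvGood a b m) (i j : Nat) :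
    pvGood a b (m.insert (i, j) (pvN a b i j)) := by
  intro i' j' v hv
  rw [PySem.Dict.get?_insert] at hv
  split_ifs at hv with hc
  · obtain ⟨rfl, rfl⟩ := Prod.mk.injEq .. ▸ Prod.ext_iff.mp hc
    exact (Option.some.injEq .. ▸ hv).symm
  · exact h i' j' v hv

theorem pvSolve_correct (a b : List Char) : ∀ fuel i j memo, i + j < fuel → pvGood a b memo →
    (pvSolve a b fuel i j memo).1 = pvN a b i j ∧ pvGood a b (pvSolve a b fuel i j memo).2 := by
  intro fuel
  induction fuel with
  | zero => intro i j memo hn; omega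
  | succ n ih =>
    intro i j memo hn hg
    rw [pvSolve]
    cases hmem : memo.get? (i, j) with
    | some v => exact ⟨hg i j v hmem, hg⟩
    | none =>
      by_cases hi : i = 0
      · subst hi
        rw [if_pos rfl]
        refine ⟨by simp [pvN]; ring, ?_⟩
        have he : (j : Int) * 2 = pvN a b 0 j := by simp [pvN]; ring
        rw [he]
        exact pvGood_insert hg 0 j
      · by_cases hj : j = 0
        · subst hj
          rw [if_neg hi, if_pos rfl]
          refine ⟨by rw [pvN_zero_right]; ring, ?_⟩
          have he : (i : Int) * 2 = pvN a b i 0 := by rw [pvN_zero_right]; ring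
          rw [he]
          exact pvGood_insert hg i 0
        · rw [if_neg hi, if_neg hj]
          obtain ⟨i', rfl⟩ := Nat.exists_eq_succ_of_ne_zero hi
          obtain ⟨j', rfl⟩ := Nat.exists_eq_succ_of_ne_zero hj
          have h1 := ih i' j' memo (by omega) hg
          have h2 := ih (i' + 1) j' (pvSolve a b n i' j' memo).2 (by omega) h1.2
          have h3 := ih i' (j' + 1) (pvSolve a b n (i' + 1) j' (pvSolve a b n i' j' memo).2).2
            (by omega) h2.2
          simp only [Nat.succ_eq_add_one, Nat.add_sub_cancel]
          have heq : min ((pvSolve a b n i' j' memo).1 +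
                (if a.getD i' ' ' = b.getD j' ' ' then (0 : Int) else 1))
              (min ((pvSolve a b n (i' + 1) j' (pvSolve a b n i' j' memo).2).1 + 2)
                ((pvSolve a b n i' (j' + 1)
                  (pvSolve a b n (i' + 1) j' (pvSolve a b n i' j' memo).2).2).1 + 2))
              = pvN a b (i' + 1) (j' + 1) := by
            rw [h1.1, h2.1, h3.1, pvN]
            omega
          refine ⟨heq, ?_⟩
          rw [heq]
          exact pvGood_insert h3.2 (i' + 1) (j' + 1)

theorem pvB_eq (sequenceA sequenceB : String) :
    get_dissimilarity_alt sequenceA sequenceB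
      = pvN sequenceA.toList sequenceB.toList sequenceA.toList.length sequenceB.toList.length := by
  simp only [get_dissimilarity_alt]
  exact (pvSolve_correct sequenceA.toList sequenceB.toList
    (sequenceA.toList.length + sequenceB.toList.length + 1) _ _ PySem.Dict.empty
    (by omega) (pvGood_empty _ _)).1

-- ===== VERDICT (by name: the statement is the Claim_ definition above) =====
theorem get_dissimilarity_spec : Claim_equal_get_dissimilarity := by
  intro sa sb _
  unfold Spec_get_dissimilarity
  rw [pvA_eq, pvB_eq]
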